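-- pv_equiv track=rewrite | github.com/SimpleDMCA/simpledmca-pumpfun | learning_examples/automated_trader.py | is_valid_graduation
-- ===== SOURCE A (Python) =====
-- def is_valid_graduation(logs: list) -> bool:
--     """Check if the logs indicate a valid graduation event"""
--     if not logs:
--         return False
--
--     # Check for successful transaction
--     if any("Error" in log for log in logs):
--         return False
--
--     # Check for migration instruction
--     if not any("Program log: Instruction: Migrate" in log for log in logs):
--         return False
--
--     # Check if already migrated
--     if any("Program log: Bonding curve already migrated" in log for log in logs):
--         return False
--
--     return True
-- ===== SOURCE B (Python) =====
-- def is_valid_graduation(logs: list) -> bool: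
--     """Single early-exit pass classifying each line: any fatal line (an error
--     or an already-migrated notice) aborts immediately with False; otherwise
--     accumulate whether a Migrate instruction was seen and return that at the
--     end (the empty input falls out of the accumulator's initial value)."""
--     _FATAL = ("Error", "Program log: Bonding curve already migrated")
--     found_migrate = False
--     for log in logs:
--         if any(bad in log for bad in _FATAL):
--             return False
--         found_migrate = found_migrate or "Program log: Instruction: Migrate" in log
--     return found_migrate
-- ===== Notes on version B (the rewrite author's own statement) =====
-- stated objective: alternative
-- what changed: Replaces A's empty-list guard plus three staged any()/not-any() scans with one early-exit pass that classifies each line (a fatal line - error or already-migrated - aborts immediately with False; a Migrate line sets an accumulator that is returned at the end, so the empty case falls out of the accumulator's initial value).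
import Mathlib
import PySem

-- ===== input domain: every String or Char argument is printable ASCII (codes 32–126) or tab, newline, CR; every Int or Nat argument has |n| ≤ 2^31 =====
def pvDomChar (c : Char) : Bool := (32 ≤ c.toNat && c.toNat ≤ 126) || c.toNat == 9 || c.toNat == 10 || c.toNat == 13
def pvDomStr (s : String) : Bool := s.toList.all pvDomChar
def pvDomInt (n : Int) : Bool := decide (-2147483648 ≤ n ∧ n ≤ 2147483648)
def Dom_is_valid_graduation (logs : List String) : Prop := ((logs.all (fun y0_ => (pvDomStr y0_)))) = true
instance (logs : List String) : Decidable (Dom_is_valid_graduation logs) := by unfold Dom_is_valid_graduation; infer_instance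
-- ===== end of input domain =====

-- B replaces A's empty guard and staged any()/not-any() scans with one early-exit pass classifying each line; alternative decomposition, same cost.

-- ===== PORT A =====
def is_valid_graduation (logs : List String) : Bool :=
  if logs = [] then false
  else if logs.any (fun log => PySem.Str.isIn "Error" log) then false
  else if !(logs.any (fun log => PySem.Str.isIn "Program log: Instruction: Migrate" log)) then false
  else if logs.any (fun log => PySem.Str.isIn "Program log: Bonding curve already migrated" log) then false
  else true

-- ===== PORT B =====
def pvFatal : List String := ["Error", "Program log: Bonding curve already migrated"]

def pvGo : List String → Bool → Bool
  | [], found_migrate => found_migrate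
  | log :: rest, found_migrate =>
    if pvFatal.any (fun bad => PySem.Str.isIn bad log) then false
    else pvGo rest (found_migrate || PySem.Str.isIn "Program log: Instruction: Migrate" log)

def is_valid_graduation_alt (logs : List String) : Bool := pvGo logs false

-- ===== PRECONDITION & SPEC =====
def Spec_is_valid_graduation (logs : List String) (out : Bool) : Prop := out = is_valid_graduation_alt logs
instance (logs : List String) (out : Bool) : Decidable (Spec_is_valid_graduation logs out) := by unfold Spec_is_valid_graduation; infer_instance

-- ===== CLAIM (what is proved, stated in full; the proofs are below) =====
def Claim_equal_is_valid_graduation : Prop := ∀ (logs : List String), Dom_is_valid_graduation logs → Spec_is_valid_graduation logs (is_valid_graduation logs)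

-- ===== LEMMAS AND PROOFS =====
theorem pvGo_eq (logs : List String) (f : Bool) :
    pvGo logs f =
      (!(logs.any (fun log => pvFatal.any (fun bad => PySem.Str.isIn bad log))) &&
       (f || logs.any (fun log => PySem.Str.isIn "Program log: Instruction: Migrate" log))) := by
  induction logs generalizing f with
  | nil => simp [pvGo]
  | cons h t ih =>
    simp only [pvGo, List.any_cons]
    cases hb : (pvFatal.any fun bad => PySem.Str.isIn bad h) <;>
      simp only [ite_true, Bool.true_or, Bool.false_or, Bool.not_true,
        Bool.false_and, ih, Bool.or_assoc] <;> rfl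

theorem any_fatal (logs : List String) :
    logs.any (fun log => pvFatal.any (fun bad => PySem.Str.isIn bad log)) =
      ((logs.any fun log => PySem.Str.isIn "Error" log) ||
       (logs.any fun log => PySem.Str.isIn "Program log: Bonding curve already migrated" log)) := by
  induction logs with
  | nil => rfl
  | cons h t ih =>
    simp only [pvFatal, List.any_cons, List.any_nil, Bool.or_false] at ih ⊢
    rw [ih]
    cases PySem.Str.isIn "Error" h <;>
    cases PySem.Str.isIn "Program log: Bonding curve already migrated" h <;>
    cases t.any (fun log => PySem.Str.isIn "Error" log) <;>
    cases t.any (fun log => PySem.Str.isIn "Program log: Bonding curve already migrated" log) <;> rfl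

-- ===== VERDICT (by name: the statement is the Claim_ definition above) =====
theorem is_valid_graduation_spec : Claim_equal_is_valid_graduation := by
  intro logs _
  unfold Spec_is_valid_graduation is_valid_graduation is_valid_graduation_alt
  rw [pvGo_eq, any_fatal]
  cases logs with
  | nil => rfl
  | cons h t =>
    rw [if_neg (List.cons_ne_nil h t)]
    cases he : ((h :: t).any fun log => PySem.Str.isIn "Error" log) <;>
    cases hm : ((h :: t).any fun log => PySem.Str.isIn "Program log: Instruction: Migrate" log) <;>
    cases ha : ((h :: t).any fun log => PySem.Str.isIn "Program log: Bonding curve already migrated" log) <;>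
    rfl
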